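-- pv_equiv track=rewrite | github.com/ibtissem101/Advent-Of-Code-2025 | 3rdday/day3-part1.py | find_best_left_digit
-- ===== SOURCE A (Python) =====
-- def find_best_left_digit(n):
--     s = str(n)
--     i = 0
--     while i < len(s) - 1:
--         jump = False
--         for j in range(i + 1, len(s)-1):
--             if s[i] < s[j]:
--                 i = j
--                 jump = True
--                 break
--         if not jump:
--             break
--     return i
-- ===== SOURCE B (Python) =====
-- def find_best_left_digit(n):
--     s = str(n)
--     best = 0
--     for idx in range(1, len(s) - 1):
--         if s[idx] > s[best]:
--             best = idx
--     return best
-- ===== Notes on version B (the rewrite author's own statement) =====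
-- stated objective: simpler
-- what changed: A's greedy forward-jump-and-restart walk (nested while/for with break) is replaced by a single leftmost-argmax scan over the same index range 0..len(s)-2.
import Mathlib
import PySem

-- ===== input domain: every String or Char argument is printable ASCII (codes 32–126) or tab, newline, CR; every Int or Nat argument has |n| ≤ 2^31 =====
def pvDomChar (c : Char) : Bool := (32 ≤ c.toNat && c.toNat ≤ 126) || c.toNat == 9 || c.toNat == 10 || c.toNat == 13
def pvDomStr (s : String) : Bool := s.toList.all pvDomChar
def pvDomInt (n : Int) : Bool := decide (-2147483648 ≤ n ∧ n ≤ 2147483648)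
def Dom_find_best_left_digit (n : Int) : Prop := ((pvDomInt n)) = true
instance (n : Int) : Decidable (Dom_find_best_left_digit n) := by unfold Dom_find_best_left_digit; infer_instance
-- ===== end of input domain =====

-- B replaces A's greedy jump-and-restart walk by a single leftmost-argmax scan (simpler; same O(n) cost).

-- ===== PORT A =====
-- inner 'for j in range(i+1, len(s)-1): if s[i] < s[j]: …break' — first j with s[i] < s[j], else none.
-- fuel (initially len(s), always sufficient) only makes the recursion structural; it never changes the result.
def pvInnerAF (fuel : Nat) (l : List Char) (c : Char) (j : Nat) : Option Nat :=
  match fuel with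
  | 0 => none
  | f + 1 =>
    if j < l.length - 1 then
      (if c < l.getD j ' ' then some j else pvInnerAF f l c (j + 1))
    else none

-- outer 'while i < len(s) - 1' loop of A (jump to the first larger digit, or stop)
def pvOuterAF (fuel : Nat) (l : List Char) (i : Nat) : Nat :=
  match fuel with
  | 0 => i
  | f + 1 =>
    if i < l.length - 1 then
      match pvInnerAF l.length l (l.getD i ' ') (i + 1) with
      | some j => pvOuterAF f l j
      | none => i
    else i

def find_best_left_digit (n : Int) : Int :=
  ((pvOuterAF (PySem.Int.toStr n).toList.length (PySem.Int.toStr n).toList 0 : Nat) : Int)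

-- ===== PORT B =====
-- 'for idx in range(1, len(s)-1): if s[idx] > s[best]: best = idx' (fuel = len(s), always sufficient)
def pvBestBF (fuel : Nat) (l : List Char) (best idx : Nat) : Nat :=
  match fuel with
  | 0 => best
  | f + 1 =>
    if idx < l.length - 1 then
      pvBestBF f l (if l.getD best ' ' < l.getD idx ' ' then idx else best) (idx + 1)
    else best

def find_best_left_digit_alt (n : Int) : Int :=
  ((pvBestBF (PySem.Int.toStr n).toList.length (PySem.Int.toStr n).toList 0 1 : Nat) : Int)

-- ===== PRECONDITION & SPEC =====
def Spec_find_best_left_digit (n : Int) (out : Int) : Prop := out = find_best_left_digit_alt n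
instance (n : Int) (out : Int) : Decidable (Spec_find_best_left_digit n out) := by unfold Spec_find_best_left_digit; infer_instance

-- ===== CLAIM (what is proved, stated in full; the proofs are below) =====
def Claim_equal_find_best_left_digit : Prop := ∀ (n : Int), Dom_find_best_left_digit n → Spec_find_best_left_digit n (find_best_left_digit n)

-- ===== LEMMAS AND PROOFS =====

-- pvInnerAF with sufficient fuel: a successful result is in range and at or after the start
theorem pvInnerAF_ge (fuel : Nat) (l : List Char) (c : Char) (j0 j : Nat)
    (h : pvInnerAF fuel l c j0 = some j) : j0 ≤ j ∧ j < l.length - 1 := by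
  induction fuel generalizing j0 with
  | zero => cases h
  | succ f ih =>
    unfold pvInnerAF at h
    split at h
    · split at h
      · cases h; omega
      · have := ih (j0 + 1) h; omega
    · cases h

-- with sufficient fuel, none ⇒ no later in-range index beats c
theorem pvInnerAF_none (fuel : Nat) (l : List Char) (c : Char) (j0 : Nat)
    (hf : l.length ≤ fuel + j0) (h : pvInnerAF fuel l c j0 = none) :
    ∀ m, j0 ≤ m → m < l.length - 1 → ¬ c < l.getD m ' ' := by
  induction fuel generalizing j0 with
  | zero => intro m hm1 hm2 _; omega
  | succ f ih =>
    intro m hm1 hm2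
    unfold pvInnerAF at h
    split at h
    · split at h
      · cases h
      · rcases Nat.eq_or_lt_of_le hm1 with rfl | hlt
        · assumption
        · exact ih (j0 + 1) (by omega) h m hlt hm2
    · omega

-- some j ⇒ j beats c and is the FIRST index ≥ j0 doing so
theorem pvInnerAF_some (fuel : Nat) (l : List Char) (c : Char) (j0 j : Nat)
    (h : pvInnerAF fuel l c j0 = some j) :
    c < l.getD j ' ' ∧ ∀ m, j0 ≤ m → m < j → ¬ c < l.getD m ' ' := by
  induction fuel generalizing j0 with
  | zero => cases h
  | succ f ih =>
    unfold pvInnerAF at h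
    split at h
    · split at h
      · cases h
        exact ⟨by assumption, fun m hm1 hm2 => by omega⟩
      · have ihr := ih (j0 + 1) h
        refine ⟨ihr.1, fun m hm1 hm2 => ?_⟩
        rcases Nat.eq_or_lt_of_le hm1 with rfl | hlt
        · assumption
        · exact ihr.2 m hlt hm2
    · cases h

-- pvBestBF's result does not depend on fuel once it is sufficient
theorem pvBestBF_fuel (f1 f2 : Nat) (l : List Char) (b idx : Nat)
    (h1 : l.length ≤ f1 + idx) (h2 : l.length ≤ f2 + idx) :
    pvBestBF f1 l b idx = pvBestBF f2 l b idx := by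
  induction f1 generalizing f2 b idx with
  | zero =>
    cases f2 with
    | zero => rfl
    | succ g => unfold pvBestBF; rw [if_neg (by omega)]
  | succ f ih =>
    cases f2 with
    | zero => unfold pvBestBF; rw [if_neg (by omega)]
    | succ g =>
      unfold pvBestBF
      split
      · exact ih g _ _ (by omega) (by omega)
      · rfl

-- if nothing in [idx, len-1) beats l[b], the scan keeps b (any fuel)
theorem pvBestBF_const (fuel : Nat) (l : List Char) (b idx : Nat)
    (h : ∀ m, idx ≤ m → m < l.length - 1 → ¬ l.getD b ' ' < l.getD m ' ') :
    pvBestBF fuel l b idx = b := by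
  induction fuel generalizing idx with
  | zero => rfl
  | succ f ih =>
    unfold pvBestBF
    split
    · rw [if_neg (h idx le_rfl (by assumption))]
      exact ih (idx + 1) (fun m hm1 hm2 => h m (by omega) hm2)
    · rfl

-- stepping the scan across a failing stretch [k, j) up to the first winner j
theorem pvBestBF_jump (fuel : Nat) (l : List Char) (b k j : Nat)
    (hk : k ≤ j) (hj : j < l.length - 1)
    (hf : l.length ≤ fuel + k)
    (hwin : l.getD b ' ' < l.getD j ' ')
    (hfail : ∀ m, k ≤ m → m < j → ¬ l.getD b ' ' < l.getD m ' ') :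
    pvBestBF fuel l b k = pvBestBF l.length l j (j + 1) := by
  induction fuel generalizing k with
  | zero => omega
  | succ f ih =>
    rcases Nat.eq_or_lt_of_le hk with rfl | hlt
    · conv_lhs => rw [pvBestBF]
      rw [if_pos hj, if_pos hwin]
      exact pvBestBF_fuel f l.length l k (k + 1) (by omega) (by omega)
    · conv_lhs => rw [pvBestBF]
      rw [if_pos (by omega : k < l.length - 1), if_neg (hfail k le_rfl hlt)]
      exact ih (k + 1) (by omega) (by omega) (fun m hm1 hm2 => hfail m (by omega) hm2)

-- main: A's walk from i equals B's scan with best = i, idx = i + 1 (fuel = len on both sides)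
theorem pvOuterAF_eq_pvBestBF (fuel : Nat) (l : List Char) (i : Nat)
    (hf : l.length ≤ fuel + i) :
    pvOuterAF fuel l i = pvBestBF l.length l i (i + 1) := by
  induction fuel generalizing i with
  | zero =>
    exact (pvBestBF_const l.length l i (i + 1) (fun m hm1 hm2 => by omega)).symm
  | succ f ih =>
    by_cases hi : i < l.length - 1
    · conv_lhs => rw [pvOuterAF]
      rw [if_pos hi]
      cases hm : pvInnerAF l.length l (l.getD i ' ') (i + 1) with
      | some j =>
        have hs := pvInnerAF_some l.length l (l.getD i ' ') (i + 1) j hm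
        have hge := pvInnerAF_ge l.length l (l.getD i ' ') (i + 1) j hm
        show pvOuterAF f l j = _
        rw [ih j (by omega)]
        exact (pvBestBF_jump l.length l i (i + 1) j hge.1 hge.2 (by omega) hs.1 hs.2).symm
      | none =>
        show i = _
        exact (pvBestBF_const l.length l i (i + 1)
          (pvInnerAF_none l.length l _ _ (by omega) hm)).symm
    · conv_lhs => rw [pvOuterAF]
      rw [if_neg hi]
      exact (pvBestBF_const l.length l i (i + 1) (fun m hm1 hm2 => by omega)).symm

-- ===== VERDICT (by name: the statement is the Claim_ definition above) =====
theorem find_best_left_digit_spec : Claim_equal_find_best_left_digit := by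
  intro n _
  unfold Spec_find_best_left_digit find_best_left_digit find_best_left_digit_alt
  rw [pvOuterAF_eq_pvBestBF _ _ 0 (by omega)]
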